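-- pv_equiv track=rewrite | github.com/ThomasAstley/ortho-graph | src/ortho_graph/main.py | new_coordinate
-- ===== SOURCE A (Python) =====
-- def new_coordinate(src_coordinate, node_name, used_coordinates):
--     offsets        = [(0,3), (3,0), (0,-3), (-3,0)]
--     offset_index   = 0
--
--     new_coordinate = src_coordinate
--
--     while new_coordinate in used_coordinates:
--         new_coordinate = (src_coordinate[0] + offsets[offset_index][0], src_coordinate[1] + offsets[offset_index][1])
--         offset_index += 1
--
--         if offset_index > 3:
--             for position, offset in enumerate(offsets):
--                 if offset[0] > 0:
--                     offset_x = offset[0] + 3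
--                 elif offset[0] < 0:
--                     offset_x = offset[0] - 3
--                 else:
--                     offset_x = 0
--
--                 if offset[1] > 0:
--                     offset_y = offset[1] + 3
--                 elif offset[1] < 0:
--                     offset_y = offset[1] - 3
--                 else:
--                     offset_y = 0
--
--                 offsets[position] = (offset_x, offset_y)
--
--             offset_index = 0
--
--     return new_coordinate
-- ===== SOURCE B (Python) =====
-- def _probe_index(src, p):
--     # Inverse of the probe sequence: index k such that p is the k-th candidate
--     # around src (0 = src itself), or None if p is never probed.
--     dx = p[0] - src[0]
--     dy = p[1] - src[1]
--     if dx == 0 and dy == 0: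
--         return 0
--     if dx == 0 and dy > 0 and dy % 3 == 0:
--         return 4 * (dy // 3) - 3
--     if dy == 0 and dx > 0 and dx % 3 == 0:
--         return 4 * (dx // 3) - 2
--     if dx == 0 and dy < 0 and dy % 3 == 0:
--         return 4 * (-dy // 3) - 1
--     if dy == 0 and dx < 0 and dx % 3 == 0:
--         return 4 * (-dx // 3)
--     return None
--
--
-- def new_coordinate(src_coordinate, node_name, used_coordinates):
--     # Map each used coordinate to the probe index it blocks (if any), then take
--     # the smallest unblocked index and decode it back into a coordinate.
--     blocked = {i for i in (_probe_index(src_coordinate, p) for p in used_coordinates)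
--                if i is not None}
--     k = 0
--     while k in blocked:
--         k += 1
--     if k == 0:
--         return src_coordinate
--     q, r = divmod(k - 1, 4)
--     rad = 3 * (q + 1)
--     dx, dy = ((0, 1), (1, 0), (0, -1), (-1, 0))[r]
--     return (src_coordinate[0] + dx * rad, src_coordinate[1] + dy * rad)
-- ===== Notes on version B (the rewrite author's own statement) =====
-- stated objective: alternative
-- what changed: B inverts the search: instead of probing candidates outward and testing each against the used list, it maps every used coordinate to the probe index it would block (an arithmetic inverse of the probe sequence), collects those indices in a set, takes the smallest unblocked index (mex) and decodes it back into a coordinate; one pass over used_coordinates instead of A's probe-and-test loop with a mutated offsets list.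
import Mathlib
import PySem

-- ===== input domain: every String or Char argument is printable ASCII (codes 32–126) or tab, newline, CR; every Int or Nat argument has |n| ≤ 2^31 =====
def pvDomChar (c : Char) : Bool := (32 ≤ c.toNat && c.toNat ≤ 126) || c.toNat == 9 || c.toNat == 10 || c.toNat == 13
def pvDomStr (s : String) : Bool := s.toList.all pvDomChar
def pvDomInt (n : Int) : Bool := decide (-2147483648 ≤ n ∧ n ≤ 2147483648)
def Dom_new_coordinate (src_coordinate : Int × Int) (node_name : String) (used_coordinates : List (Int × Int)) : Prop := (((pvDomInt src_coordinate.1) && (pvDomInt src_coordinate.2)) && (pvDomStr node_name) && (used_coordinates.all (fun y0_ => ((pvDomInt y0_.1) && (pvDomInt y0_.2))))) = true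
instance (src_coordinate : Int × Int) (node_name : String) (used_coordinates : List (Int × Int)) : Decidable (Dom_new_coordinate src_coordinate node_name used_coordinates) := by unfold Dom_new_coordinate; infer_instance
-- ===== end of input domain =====

-- B inverts the probe sequence: each used coordinate is mapped to the probe index it blocks
-- (a set of integers), the answer is the smallest unblocked index, decoded back into a
-- coordinate — instead of A's probe-and-test loop over a mutated offsets list (objective: alternative).

-- ===== PORT A =====
-- the per-cycle rescaling of one offset entry (the body of A's inner for-loop)
def pvGrowOff (p : Int × Int) : Int × Int :=
  let offset_x := if p.1 > 0 then p.1 + 3 else if p.1 < 0 then p.1 - 3 else 0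
  let offset_y := if p.2 > 0 then p.2 + 3 else if p.2 < 0 then p.2 - 3 else 0
  (offset_x, offset_y)

-- A's while loop; one unit of fuel per iteration.  The probed candidates are pairwise
-- distinct, so the loop runs at most used_coordinates.length times and the fuel
-- used_coordinates.length + 1 supplied below is never exhausted.
def pvALoop (used_coordinates : List (Int × Int)) (src_coordinate : Int × Int) :
    Nat → List (Int × Int) → Int → (Int × Int) → (Int × Int)
  | 0, _, _, cur => cur
  | fuel + 1, offsets, offset_index, cur =>
    if cur ∈ used_coordinates then
      -- offsets[offset_index]: offset_index is always in range 0..3 (list of length 4)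
      let off := (PySem.List.pyGet? offsets offset_index).getD (0, 0)
      let cand := (src_coordinate.1 + off.1, src_coordinate.2 + off.2)
      let offset_index' := offset_index + 1
      if offset_index' > 3 then
        pvALoop used_coordinates src_coordinate fuel (offsets.map pvGrowOff) 0 cand
      else
        pvALoop used_coordinates src_coordinate fuel offsets offset_index' cand
    else cur

def new_coordinate (src_coordinate : Int × Int) (node_name : String) (used_coordinates : List (Int × Int)) : Int × Int :=
  pvALoop used_coordinates src_coordinate (used_coordinates.length + 1)
    [(0, 3), (3, 0), (0, -3), (-3, 0)] 0 src_coordinate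

-- ===== PORT B =====
-- _probe_index: the probe index p would occupy around src (0 = src itself), or none
def pvProbeIndex? (src p : Int × Int) : Option Int :=
  let dx := p.1 - src.1
  let dy := p.2 - src.2
  if dx = 0 ∧ dy = 0 then some 0
  else if dx = 0 ∧ dy > 0 ∧ PySem.Int.mod dy 3 = 0 then some (4 * PySem.Int.floordiv dy 3 - 3)
  else if dy = 0 ∧ dx > 0 ∧ PySem.Int.mod dx 3 = 0 then some (4 * PySem.Int.floordiv dx 3 - 2)
  else if dx = 0 ∧ dy < 0 ∧ PySem.Int.mod dy 3 = 0 then some (4 * PySem.Int.floordiv (-dy) 3 - 1)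
  else if dy = 0 ∧ dx < 0 ∧ PySem.Int.mod dx 3 = 0 then some (4 * PySem.Int.floordiv (-dx) 3)
  else none

-- 'while k in blocked: k += 1'; one unit of fuel per iteration.  blocked has at most
-- used_coordinates.length elements, so the fuel used_coordinates.length + 1 supplied
-- below is never exhausted.
def pvMexLoop (blocked : PySem.Set Int) : Nat → Int → Int
  | 0, k => k
  | fuel + 1, k => if k ∈ blocked then pvMexLoop blocked fuel (k + 1) else k

def new_coordinate_alt (src_coordinate : Int × Int) (node_name : String) (used_coordinates : List (Int × Int)) : Int × Int :=
  -- the set comprehension over the generator of probe indices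
  let blocked : PySem.Set Int :=
    PySem.Set.ofList (used_coordinates.filterMap (pvProbeIndex? src_coordinate))
  let k := pvMexLoop blocked (used_coordinates.length + 1) 0
  if k = 0 then src_coordinate
  else
    let q := PySem.Int.floordiv (k - 1) 4
    let r := PySem.Int.mod (k - 1) 4
    let rad := 3 * (q + 1)
    -- ((0,1),(1,0),(0,-1),(-1,0))[r]: r is in range 0..3
    let d := (PySem.List.pyGet? ([(0, 1), (1, 0), (0, -1), (-1, 0)] : List (Int × Int)) r).getD (0, 0)
    (src_coordinate.1 + d.1 * rad, src_coordinate.2 + d.2 * rad)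

-- ===== PRECONDITION & SPEC =====
def Spec_new_coordinate (src_coordinate : Int × Int) (node_name : String) (used_coordinates : List (Int × Int)) (out : Int × Int) : Prop := out = new_coordinate_alt src_coordinate node_name used_coordinates
instance (src_coordinate : Int × Int) (node_name : String) (used_coordinates : List (Int × Int)) (out : Int × Int) : Decidable (Spec_new_coordinate src_coordinate node_name used_coordinates out) := by unfold Spec_new_coordinate; infer_instance

-- ===== CLAIM (what is proved, stated in full; the proofs are below) =====
def Claim_equal_new_coordinate : Prop := ∀ (src_coordinate : Int × Int) (node_name : String) (used_coordinates : List (Int × Int)), Dom_new_coordinate src_coordinate node_name used_coordinates → Spec_new_coordinate src_coordinate node_name used_coordinates (new_coordinate src_coordinate node_name used_coordinates)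

-- ===== LEMMAS AND PROOFS =====

-- the k-th probe candidate around src, k = 1, 2, …  (direction (k-1)%4, radius 3*((k-1)/4+1))
def pvProbe (src : Int × Int) (n : Nat) : Int × Int :=
  let d := ([(0, 1), (1, 0), (0, -1), (-1, 0)] : List (Int × Int)).getD (n % 4) (0, 0)
  let r : Int := 3 * ((n : Int) / 4 + 1)
  (src.1 + d.1 * r, src.2 + d.2 * r)

-- the full candidate sequence: index 0 is src itself
def pvC (src : Int × Int) : Nat → Int × Int
  | 0 => src
  | n + 1 => pvProbe src n

-- reference search: first candidate (from index k on) not in used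
def pvSearch (used : List (Int × Int)) (src : Int × Int) : Nat → Nat → Int × Int
  | 0, k => pvC src k
  | f + 1, k => if pvC src k ∈ used then pvSearch used src f (k + 1) else pvC src k

-- the offsets list A holds when its counter has generated n candidates
def pvRad (n : Nat) : Int := 3 * ((n : Int) / 4 + 1)
def pvOffs (n : Nat) : List (Int × Int) := [(0, pvRad n), (pvRad n, 0), (0, -pvRad n), (-pvRad n, 0)]

theorem pvRad_pos (n : Nat) : 0 < pvRad n := by unfold pvRad; omega

theorem pvGrow_offs (n : Nat) (h : n % 4 = 3) : (pvOffs n).map pvGrowOff = pvOffs (n + 1) := by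
  have hp := pvRad_pos n
  have hr : pvRad (n + 1) = pvRad n + 3 := by unfold pvRad; omega
  have hneg : -pvRad n < 0 := by omega
  have hneg' : ¬ (0 : Int) < -pvRad n := by omega
  simp only [pvOffs, List.map_cons, List.map_nil, pvGrowOff, hr]
  simp only [gt_iff_lt, lt_irrefl, if_false, hp, if_true, not_lt.mpr hp.le, hneg, hneg',
    List.cons.injEq, Prod.mk.injEq, and_true, true_and]
  omega

theorem pvProbe_eq (n : Nat) (src : Int × Int) :
    pvProbe src n = (src.1 + ((PySem.List.pyGet? (pvOffs n) ((n % 4 : Nat) : Int)).getD (0,0)).1,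
                     src.2 + ((PySem.List.pyGet? (pvOffs n) ((n % 4 : Nat) : Int)).getD (0,0)).2) := by
  have h4 : n % 4 = 0 ∨ n % 4 = 1 ∨ n % 4 = 2 ∨ n % 4 = 3 := by omega
  rcases h4 with h | h | h | h <;> simp [pvProbe, pvOffs, pvRad, h]

-- A's loop at counter-state n is the reference search from candidate n+1
theorem pvALoop_eq_search (used : List (Int × Int)) (src : Int × Int) (f : Nat) :
    ∀ (n : Nat) (cur : Int × Int),
      pvALoop used src (f + 1) (pvOffs n) ((n % 4 : Nat) : Int) cur
        = if cur ∈ used then pvSearch used src f (n + 1) else cur := by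
  induction f with
  | zero =>
    intro n cur
    by_cases hc : cur ∈ used
    · simp only [pvALoop, pvSearch, pvC, if_pos hc, ite_self]
      exact (pvProbe_eq n src).symm
    · simp [pvALoop, hc]
  | succ f ih =>
    intro n cur
    by_cases hc : cur ∈ used
    · have hstep : pvSearch used src (f + 1) (n + 1)
          = if pvC src (n + 1) ∈ used then pvSearch used src f (n + 2) else pvC src (n + 1) := rfl
      have hA : pvALoop used src (f + 1 + 1) (pvOffs n) ((n % 4 : Nat) : Int) cur
          = if ((n % 4 : Nat) : Int) + 1 > 3
            then pvALoop used src (f + 1) ((pvOffs n).map pvGrowOff) 0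
                   (src.1 + ((PySem.List.pyGet? (pvOffs n) ((n % 4 : Nat) : Int)).getD (0,0)).1,
                    src.2 + ((PySem.List.pyGet? (pvOffs n) ((n % 4 : Nat) : Int)).getD (0,0)).2)
            else pvALoop used src (f + 1) (pvOffs n) (((n % 4 : Nat) : Int) + 1)
                   (src.1 + ((PySem.List.pyGet? (pvOffs n) ((n % 4 : Nat) : Int)).getD (0,0)).1,
                    src.2 + ((PySem.List.pyGet? (pvOffs n) ((n % 4 : Nat) : Int)).getD (0,0)).2) := by
        conv_lhs => rw [pvALoop]
        rw [if_pos hc]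
      rw [hA, ← pvProbe_eq n src, hstep]
      have hprobe : pvProbe src n = pvC src (n + 1) := rfl
      by_cases h3 : n % 4 = 3
      · have hmod : (n + 1) % 4 = 0 := by omega
        rw [if_pos (by rw [h3]; norm_num), pvGrow_offs n h3,
            show (0 : Int) = (((n + 1) % 4 : Nat) : Int) by rw [hmod]; norm_num,
            ih (n + 1) (pvProbe src n), hprobe, if_pos hc]
      · have hrad : pvRad (n + 1) = pvRad n := by unfold pvRad; omega
        have hoffs : pvOffs n = pvOffs (n + 1) := by rw [pvOffs, pvOffs, hrad]
        have hidx : ((n % 4 : Nat) : Int) + 1 = (((n + 1) % 4 : Nat) : Int) := by omega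
        rw [if_neg (by omega), hoffs, hidx, ih (n + 1) (pvProbe src n), hprobe, if_pos hc]
    · simp [pvALoop, hc]

-- A computes the reference search from candidate 0
theorem new_coordinate_eq_search (src : Int × Int) (node : String) (used : List (Int × Int)) :
    new_coordinate src node used = pvSearch used src (used.length + 1) 0 := by
  unfold new_coordinate
  have h0 : pvOffs 0 = [(0, 3), (3, 0), (0, -3), (-3, 0)] := by simp [pvOffs, pvRad]
  have h := pvALoop_eq_search used src used.length 0 src
  rw [h0] at h
  rw [show ((0 % 4 : Nat) : Int) = 0 by norm_num] at h
  rw [h]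
  conv_rhs => rw [pvSearch]
  rfl

-- pvProbeIndex? inverts the candidate sequence
theorem probeIndex_iff (src p : Int × Int) (m : Nat) :
    pvProbeIndex? src p = some ((m : Nat) : Int) ↔ p = pvC src m := by
  obtain ⟨px, py⟩ := p
  obtain ⟨sx, sy⟩ := src
  simp only [pvProbeIndex?]
  rw [show PySem.Int.mod (py - sy) 3 = (py - sy) % 3 from PySem.Int.mod_eq_emod_of_pos (by omega),
      show PySem.Int.mod (px - sx) 3 = (px - sx) % 3 from PySem.Int.mod_eq_emod_of_pos (by omega),
      show PySem.Int.floordiv (py - sy) 3 = (py - sy) / 3 from PySem.Int.floordiv_eq_ediv_of_pos (by omega),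
      show PySem.Int.floordiv (px - sx) 3 = (px - sx) / 3 from PySem.Int.floordiv_eq_ediv_of_pos (by omega),
      show PySem.Int.floordiv (-(py - sy)) 3 = (-(py - sy)) / 3 from PySem.Int.floordiv_eq_ediv_of_pos (by omega),
      show PySem.Int.floordiv (-(px - sx)) 3 = (-(px - sx)) / 3 from PySem.Int.floordiv_eq_ediv_of_pos (by omega)]
  constructor
  · intro h
    split_ifs at h with h1 h2 h3 h4 h5 <;>
      simp only [Option.some.injEq] at h
    · -- m = 0, p = src
      have hm : m = 0 := by omega
      subst hm
      simp only [pvC, Prod.mk.injEq]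
      omega
    · -- up: dy > 0
      have hm1 : 1 ≤ m := by omega
      obtain ⟨n, rfl⟩ : ∃ n, m = n + 1 := ⟨m - 1, by omega⟩
      have hmod : n % 4 = 0 := by omega
      simp only [pvC, pvProbe, hmod, List.getD, List.getElem?_cons_zero, Option.getD_some,
        Prod.mk.injEq]
      omega
    · have hm1 : 1 ≤ m := by omega
      obtain ⟨n, rfl⟩ : ∃ n, m = n + 1 := ⟨m - 1, by omega⟩
      have hmod : n % 4 = 1 := by omega
      simp only [pvC, pvProbe, hmod, List.getD, List.getElem?_cons_succ, List.getElem?_cons_zero,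
        Option.getD_some, Prod.mk.injEq]
      omega
    · have hm1 : 1 ≤ m := by omega
      obtain ⟨n, rfl⟩ : ∃ n, m = n + 1 := ⟨m - 1, by omega⟩
      have hmod : n % 4 = 2 := by omega
      simp only [pvC, pvProbe, hmod, List.getD, List.getElem?_cons_succ, List.getElem?_cons_zero,
        Option.getD_some, Prod.mk.injEq]
      omega
    · have hm1 : 1 ≤ m := by omega
      obtain ⟨n, rfl⟩ : ∃ n, m = n + 1 := ⟨m - 1, by omega⟩
      have hmod : n % 4 = 3 := by omega
      simp only [pvC, pvProbe, hmod, List.getD, List.getElem?_cons_succ, List.getElem?_cons_zero,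
        Option.getD_some, Prod.mk.injEq]
      omega
  · intro h
    match m, h with
    | 0, h =>
      simp only [pvC, Prod.mk.injEq] at h
      rw [if_pos (by omega)]
      norm_num
    | n + 1, h =>
      have h4 : n % 4 = 0 ∨ n % 4 = 1 ∨ n % 4 = 2 ∨ n % 4 = 3 := by omega
      have hrp : (0 : Int) < 3 * ((n : Int) / 4 + 1) := by omega
      rcases h4 with hmod | hmod | hmod | hmod <;>
        simp only [pvC, pvProbe, hmod, List.getD, List.getElem?_cons_zero,
          List.getElem?_cons_succ, Option.getD_some, Prod.mk.injEq] at h <;>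
        obtain ⟨hx, hy⟩ := h
      · rw [if_neg (by omega), if_pos (by constructor <;> omega)]
        simp only [Option.some.injEq]; omega
      · rw [if_neg (by omega), if_neg (by omega), if_pos (by constructor <;> omega)]
        simp only [Option.some.injEq]; omega
      · rw [if_neg (by omega), if_neg (by omega), if_neg (by omega),
          if_pos (by constructor <;> omega)]
        simp only [Option.some.injEq]; omega
      · rw [if_neg (by omega), if_neg (by omega), if_neg (by omega), if_neg (by omega),
          if_pos (by constructor <;> omega)]
        simp only [Option.some.injEq]; omega

-- membership in the blocked set is collision of the corresponding candidate
theorem mem_blocked_iff (src : Int × Int) (used : List (Int × Int)) (m : Nat) :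
    ((m : Nat) : Int) ∈ PySem.Set.ofList (used.filterMap (pvProbeIndex? src))
      ↔ pvC src m ∈ used := by
  rw [PySem.Set.mem_ofList, List.mem_filterMap]
  constructor
  · rintro ⟨p, hp, hidx⟩
    rw [(probeIndex_iff src p m).mp hidx] at hp
    exact hp
  · intro h
    exact ⟨pvC src m, h, (probeIndex_iff src (pvC src m) m).mpr rfl⟩

-- decoding an index gives the corresponding candidate
theorem decode_eq_pvC (src : Int × Int) (m : Nat) :
    (if ((m : Nat) : Int) = 0 then src
     else
       let q := PySem.Int.floordiv (((m : Nat) : Int) - 1) 4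
       let r := PySem.Int.mod (((m : Nat) : Int) - 1) 4
       let rad := 3 * (q + 1)
       let d := (PySem.List.pyGet? ([(0, 1), (1, 0), (0, -1), (-1, 0)] : List (Int × Int)) r).getD (0, 0)
       (src.1 + d.1 * rad, src.2 + d.2 * rad)) = pvC src m := by
  match m with
  | 0 => simp [pvC]
  | n + 1 =>
    rw [if_neg (by omega)]
    have hsub : ((((n : Nat) + 1 : Nat)) : Int) - 1 = ((n : Nat) : Int) := by push_cast; ring
    rw [hsub,
      show PySem.Int.floordiv ((n : Nat) : Int) 4 = ((n / 4 : Nat) : Int) by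
        exact_mod_cast PySem.Int.floordiv_natCast n 4,
      show PySem.Int.mod ((n : Nat) : Int) 4 = ((n % 4 : Nat) : Int) by
        exact_mod_cast PySem.Int.mod_natCast n 4]
    have h4 : n % 4 = 0 ∨ n % 4 = 1 ∨ n % 4 = 2 ∨ n % 4 = 3 := by omega
    have hdiv : ((n / 4 : Nat) : Int) + 1 = (n : Int) / 4 + 1 := by omega
    rcases h4 with h | h | h | h <;>
      simp only [pvC, pvProbe, h, Nat.cast_ofNat, Nat.cast_zero, Nat.cast_one] <;>
      simp [PySem.List.pyGet?, PySem.List.pyIdx?, List.getD, ← hdiv]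

-- the mex loop followed by decoding is the reference search
theorem mex_decode_eq_search (src : Int × Int) (used : List (Int × Int)) (f : Nat) :
    ∀ (m : Nat),
      (let blocked := PySem.Set.ofList (used.filterMap (pvProbeIndex? src))
       let k := pvMexLoop blocked f ((m : Nat) : Int)
       if k = 0 then src
       else
         let q := PySem.Int.floordiv (k - 1) 4
         let r := PySem.Int.mod (k - 1) 4
         let rad := 3 * (q + 1)
         let d := (PySem.List.pyGet? ([(0, 1), (1, 0), (0, -1), (-1, 0)] : List (Int × Int)) r).getD (0, 0)
         (src.1 + d.1 * rad, src.2 + d.2 * rad))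
        = pvSearch used src f m := by
  induction f with
  | zero =>
    intro m
    simp only [pvMexLoop, pvSearch]
    exact decode_eq_pvC src m
  | succ f ih =>
    intro m
    simp only [pvMexLoop, pvSearch]
    by_cases hb : pvC src m ∈ used
    · rw [if_pos ((mem_blocked_iff src used m).mpr hb), if_pos hb,
        show ((m : Nat) : Int) + 1 = (((m + 1 : Nat)) : Int) by push_cast; ring]
      exact ih (m + 1)
    · rw [if_neg (fun hc => hb ((mem_blocked_iff src used m).mp hc)), if_neg hb]
      exact decode_eq_pvC src m

-- ===== VERDICT (by name: the statement is the Claim_ definition above) =====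
theorem new_coordinate_spec : Claim_equal_new_coordinate := by
  intro src node used _
  unfold Spec_new_coordinate
  rw [new_coordinate_eq_search src node used]
  unfold new_coordinate_alt
  exact (mex_decode_eq_search src used (used.length + 1) 0).symm
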